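-- pv_equiv track=rewrite | github.com/ParkHoH/Algorithm_test | programmers/LV_2/주식가격.py | solution
-- ===== SOURCE A (Python) =====
-- def solution(prices):
--     stack = [[prices[0], 0]]
--     result = [0 for i in range(len(prices))]
--     for i in range(1, len(prices)):
--         while prices[i] < stack[-1][0]:
--             pre_stack = stack.pop()
--             result[pre_stack[1]] = i - pre_stack[1]
--             if len(stack) == 0:
--                 break
--         stack.append([prices[i], i])
--
--     for i in range(len(result) - 1):
--         if result[i] == 0:
--             result[i] = len(result) - i - 1
--
--     return result
-- ===== SOURCE B (Python) =====
-- def solution(prices):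
--     result = []
--     for i in range(len(prices)):
--         p = prices[i]
--         count = 0
--         for q in prices[i + 1:]:
--             count += 1
--             if q < p:
--                 break
--         result.append(count)
--     return result
-- ===== Notes on version B (the rewrite author's own statement) =====
-- stated objective: simpler
-- what changed: Replaces the monotonic-stack pass plus zero-fixup second pass with a direct double loop: for each position, count forward until the first strictly smaller price. Pre_ excludes only the empty list, where A raises IndexError.
import Mathlib
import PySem

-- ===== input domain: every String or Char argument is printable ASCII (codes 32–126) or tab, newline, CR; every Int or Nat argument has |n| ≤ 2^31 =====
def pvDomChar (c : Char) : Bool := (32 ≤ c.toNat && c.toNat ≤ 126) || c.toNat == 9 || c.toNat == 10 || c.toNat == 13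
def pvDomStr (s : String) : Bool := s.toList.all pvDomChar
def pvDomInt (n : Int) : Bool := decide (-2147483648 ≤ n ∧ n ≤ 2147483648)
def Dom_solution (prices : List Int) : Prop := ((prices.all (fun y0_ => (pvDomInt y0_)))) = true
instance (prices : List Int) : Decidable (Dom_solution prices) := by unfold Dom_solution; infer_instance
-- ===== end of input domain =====

-- B replaces A's monotonic-stack pass (plus the zero-fixup second pass) with a plain
-- double loop counting forward to the first strictly smaller price; same return values
-- on all nonempty inputs (A raises IndexError on []).

-- ===== PORT A =====
-- inner while-loop: pop while prices[i] < stack[-1][0], recording result[k] = i - k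
def popA (pi : Int) (i : Nat) : List (Int × Nat) → List Int → List (Int × Nat) × List Int
  | [], res => ([], res)
  | (v, k) :: rest, res =>
      if pi < v then popA pi i rest (res.set k ((i : Int) - (k : Int)))
      else ((v, k) :: rest, res)

-- for i in range(1, len(prices)): …  (structural recursion on the loop index)
def mainA (prices : List Int) (n : Nat) (i : Nat) (st : List (Int × Nat)) (res : List Int) :
    List (Int × Nat) × List Int :=
  if h : i < n then
    let pi := prices.getD i 0      -- prices[i]; i < len(prices), in range
    let pr := popA pi i st res
    mainA prices n (i + 1) ((pi, i) :: pr.1) pr.2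
  else (st, res)
termination_by n - i

-- for i in range(len(result) - 1): if result[i] == 0: result[i] = len(result) - i - 1
def fixA (n : Nat) (i : Nat) (res : List Int) : List Int :=
  if h : i < n - 1 then
    fixA n (i + 1) (if res.getD i 0 == 0 then res.set i ((n : Int) - (i : Int) - 1) else res)
  else res
termination_by n - 1 - i

def solution (prices : List Int) : List Int :=
  match prices with
  | [] => []              -- Python raises IndexError at prices[0]; excluded by Pre_solution
  | p0 :: _ =>
      let n := prices.length
      let res0 := List.replicate n (0 : Int)     -- [0 for i in range(len(prices))]
      let pr := mainA prices n 1 [(p0, 0)] res0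
      fixA n 0 pr.2

-- ===== PORT B =====
-- inner loop: count elements of the suffix up to and including the first one < pi
def countB (pi : Int) : List Int → Int
  | [] => 0
  | q :: rest => if q < pi then 1 else 1 + countB pi rest

-- outer loop over positions i (equivalently over suffixes of prices)
def solution_alt : List Int → List Int
  | [] => []
  | p :: rest => countB p rest :: solution_alt rest

-- ===== PRECONDITION & SPEC =====
-- Pre_ excludes only the empty list, on which A raises IndexError (prices[0]).
def Pre_solution (prices : List Int) : Prop := prices ≠ []
instance (prices : List Int) : Decidable (Pre_solution prices) := by unfold Pre_solution; infer_instance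

def pvWitness_solution : List Int := [1, 2, 3, 2, 3]

def Spec_solution (prices : List Int) (out : List Int) : Prop := out = solution_alt prices
instance (prices : List Int) (out : List Int) : Decidable (Spec_solution prices out) := by unfold Spec_solution; infer_instance

-- ===== CLAIM (what is proved, stated in full; the proofs are below) =====
def Claim_equal_solution : Prop := ∀ (prices : List Int), Dom_solution prices → Pre_solution prices → Spec_solution prices (solution prices)

-- ===== LEMMAS AND PROOFS =====

-- g P k = prices[k] as read by port A
def gP (P : List Int) (k : Nat) : Int := P.getD k 0

-- index k has seen no strictly smaller price in (k, i)
abbrev openP (P : List Int) (k i : Nat) : Prop := ∀ j, j < i → k < j → gP P k ≤ gP P j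

-- B's value at index k
def ddP (P : List Int) (k : Nat) : Int := countB (gP P k) (P.drop (k + 1))

-- declarative description of A's result array at the start of iteration i
def resOf (P : List Int) (i : Nat) : List Int :=
  (List.range P.length).map (fun k => if k < i ∧ ¬ openP P k i then ddP P k else 0)

-- A's stack, as the list of its indices (top first), at the start of iteration i
def activeL (P : List Int) (i : Nat) : List Nat :=
  ((List.range i).filter (fun k => decide (openP P k i))).reverse

def stackOf (P : List Int) (i : Nat) : List (Int × Nat) :=
  (activeL P i).map (fun k => (gP P k, k))

-- ---- countB characterisations ----

theorem countB_nonneg (p : Int) (l : List Int) : 0 ≤ countB p l := by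
  induction l with
  | nil => simp [countB]
  | cons q rest ih => simp only [countB]; split <;> omega

theorem countB_pos (p : Int) (l : List Int) (h : l ≠ []) : 0 < countB p l := by
  cases l with
  | nil => simp at h
  | cons q rest => have := countB_nonneg p rest; simp only [countB]; split <;> omega

theorem countB_eq_first (p : Int) (l : List Int) :
    ∀ t, t < l.length → (∀ s, s < t → p ≤ l.getD s 0) → l.getD t 0 < p →
    countB p l = (t : Int) + 1 := by
  induction l with
  | nil => intro t ht; simp at ht
  | cons q rest ih =>
    intro t ht hbefore hat
    cases t with
    | zero => simp only [List.getD_cons_zero] at hat; simp [countB, hat]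
    | succ t =>
      have hq : p ≤ q := by simpa using hbefore 0 (Nat.succ_pos t)
      have hrest : countB p rest = (t : Int) + 1 := by
        apply ih t (by simpa using ht)
        · intro s hs; simpa using hbefore (s + 1) (by omega)
        · simpa using hat
      simp only [countB, if_neg (by omega : ¬ q < p), hrest]
      push_cast; ring

theorem countB_eq_len (p : Int) (l : List Int)
    (h : ∀ t, t < l.length → p ≤ l.getD t 0) : countB p l = (l.length : Int) := by
  induction l with
  | nil => simp [countB]
  | cons q rest ih =>
    have hq : p ≤ q := by simpa using h 0 (by simp)
    have hrest : countB p rest = (rest.length : Int) := by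
      apply ih; intro t ht; simpa using h (t + 1) (by simpa using ht)
    simp only [countB, if_neg (by omega : ¬ q < p), hrest, List.length_cons]
    push_cast; ring

theorem getD_drop (P : List Int) (a t : Nat) (h : a + t < P.length) :
    (P.drop a).getD t 0 = P.getD (a + t) 0 := by
  rw [List.getD_eq_getElem P 0 h, List.getD_eq_getElem _ 0 (by simpa [List.length_drop] using by omega)]
  simp [List.getElem_drop]

-- the drop-distance value when the first strictly smaller price is at index i
theorem ddP_first (P : List Int) (m i : Nat) (hi : i < P.length) (hmi : m < i)
    (hopen : openP P m i) (hdrop : gP P i < gP P m) : ddP P m = (i : Int) - m := by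
  have hlen : (P.drop (m + 1)).length = P.length - (m + 1) := by simp
  have h1 : countB (gP P m) (P.drop (m + 1)) = ((i - m - 1 : Nat) : Int) + 1 := by
    apply countB_eq_first _ _ (i - m - 1) (by omega)
    · intro s hs
      rw [getD_drop _ _ _ (by omega)]
      exact hopen (m + 1 + s) (by omega) (by omega)
    · rw [getD_drop _ _ _ (by omega)]
      have : m + 1 + (i - m - 1) = i := by omega
      rw [this]; exact hdrop
  unfold ddP; rw [h1]; omega

-- the drop-distance value when no later price is strictly smaller
theorem ddP_none (P : List Int) (m : Nat) (hm : m < P.length) (hopen : openP P m P.length) :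
    ddP P m = (P.length : Int) - m - 1 := by
  have h1 : countB (gP P m) (P.drop (m + 1)) = ((P.drop (m + 1)).length : Int) := by
    apply countB_eq_len
    intro t ht
    rw [getD_drop _ _ _ (by simp at ht; omega)]
    exact hopen (m + 1 + t) (by simp at ht; omega) (by omega)
  unfold ddP; rw [h1]; simp; omega

-- ---- B's port computes ddP at every index ----

theorem solution_alt_eq (P : List Int) :
    solution_alt P = (List.range P.length).map (fun k => ddP P k) := by
  induction P with
  | nil => simp [solution_alt]
  | cons p rest ih =>
    rw [solution_alt, ih, List.length_cons, List.range_succ_eq_map, List.map_cons, List.map_map]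
    have h0 : ddP (p :: rest) 0 = countB p rest := by simp [ddP, gP]
    rw [h0]
    congr 1

-- ---- popA pops exactly the strictly-greater prefix of the stack ----

theorem popA_spec (P : List Int) (p : Int) (i : Nat) :
    ∀ (ks : List Nat) (res : List Int),
    ks.Pairwise (fun a b => gP P b ≤ gP P a) →
    popA p i (ks.map (fun k => (gP P k, k))) res =
      ((ks.filter (fun k => !decide (p < gP P k))).map (fun k => (gP P k, k)),
       (ks.filter (fun k => decide (p < gP P k))).foldl
         (fun r k => r.set k ((i : Int) - (k : Int))) res) := by
  intro ks
  induction ks with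
  | nil => intro res _; simp [popA]
  | cons k rest ih =>
    intro res hpw
    have hpw' := (List.pairwise_cons.mp hpw).2
    have hhead := (List.pairwise_cons.mp hpw).1
    by_cases h : p < gP P k
    · simp only [List.map_cons, popA, if_pos h, List.filter_cons,
        decide_eq_true h, Bool.not_true, ih _ hpw']
      simp [h]
    · have hrest1 : rest.filter (fun k => decide (p < gP P k)) = [] := by
        apply List.filter_eq_nil_iff.mpr
        intro b hb
        have : gP P b ≤ gP P k := hhead b hb
        simp; omega
      have hrest2 : rest.filter (fun k => !decide (p < gP P k)) = rest := by
        apply List.filter_eq_self.mpr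
        intro b hb
        have : gP P b ≤ gP P k := hhead b hb
        simp; omega
      simp only [List.map_cons, popA, if_neg h, List.filter_cons,
        decide_eq_false h, Bool.not_false, hrest1, hrest2]
      simp [h]

-- ---- the stack indices are price-sorted (deeper is smaller or equal) ----

theorem activeL_mem (P : List Int) (i m : Nat) :
    m ∈ activeL P i ↔ m < i ∧ openP P m i := by
  simp [activeL, List.mem_filter, List.mem_range]

theorem activeL_pairwise (P : List Int) (i : Nat) :
    (activeL P i).Pairwise (fun a b => gP P b ≤ gP P a) := by
  unfold activeL
  rw [List.pairwise_reverse]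
  have h1 : ((List.range i).filter (fun k => decide (openP P k i))).Pairwise (· < ·) :=
    (List.pairwise_lt_range).filter _
  apply h1.imp_of_mem
  intro a b ha hb hab
  have hao : openP P a i := by simpa using (List.mem_filter.mp ha).2
  have hbi : b < i := by simpa using List.mem_range.mp (List.mem_of_mem_filter hb)
  exact hao b hbi hab

-- ---- evolution of the stack ----

theorem openP_succ (P : List Int) (k i : Nat) (hk : k < i) :
    openP P k (i + 1) ↔ openP P k i ∧ gP P k ≤ gP P i := by
  constructor
  · intro h; exact ⟨fun j hj hkj => h j (by omega) hkj, h i (by omega) hk⟩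
  · rintro ⟨h1, h2⟩ j hj hkj
    rcases Nat.lt_succ_iff_lt_or_eq.mp hj with h | h
    · exact h1 j h hkj
    · subst h; exact h2

theorem activeL_succ (P : List Int) (i : Nat) :
    activeL P (i + 1) = i :: (activeL P i).filter (fun k => !decide (gP P i < gP P k)) := by
  unfold activeL
  rw [List.range_succ, List.filter_append, List.filter_reverse]
  have hopen : openP P i (i + 1) := by intro j hj hij; omega
  have h2 : (List.range i).filter (fun k => decide (openP P k (i + 1))) =
      ((List.range i).filter (fun k => decide (openP P k i))).filter
        (fun k => !decide (gP P i < gP P k)) := by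
    rw [List.filter_filter]
    apply List.filter_congr
    intro k hk
    have hki : k < i := List.mem_range.mp hk
    by_cases h1 : openP P k i <;> by_cases h2 : gP P k ≤ gP P i <;>
      simp [openP_succ P k i hki, h1, h2, not_lt] <;> omega
  have h3 : List.filter (fun k => decide (openP P k (i + 1))) [i] = [i] := by
    rw [List.filter_cons]; simp; intro x h1 h2; omega
  rw [h2, h3]
  simp

-- ---- evolution of the result array ----

theorem resOf_length (P : List Int) (i : Nat) : (resOf P i).length = P.length := by
  simp [resOf]

theorem resOf_getD (P : List Int) (i m : Nat) (hm : m < P.length) :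
    (resOf P i).getD m 0 = if m < i ∧ ¬ openP P m i then ddP P m else 0 := by
  unfold resOf
  rw [List.getD_eq_getElem _ 0 (by simpa using hm)]
  simp

theorem foldl_set_length (f : Nat → Int) (ks : List Nat) (res : List Int) :
    (ks.foldl (fun r k => r.set k (f k)) res).length = res.length := by
  induction ks generalizing res with
  | nil => rfl
  | cons k rest ih => simp [List.foldl_cons, ih]

theorem foldl_set_getD (f : Nat → Int) (ks : List Nat) (res : List Int) (m : Nat)
    (hm : m < res.length) :
    (ks.foldl (fun r k => r.set k (f k)) res).getD m 0 =
      if m ∈ ks then f m else res.getD m 0 := by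
  induction ks generalizing res with
  | nil => simp
  | cons k rest ih =>
    rw [List.foldl_cons, ih _ (by simpa using hm)]
    by_cases hmr : m ∈ rest
    · simp [hmr]
    · by_cases hkm : k = m
      · subst hkm
        rw [List.getD_eq_getElem _ 0 (by simpa using hm)]
        simp [hmr, List.getElem_set_self]
      · rw [List.getD_eq_getElem _ 0 (by simpa using hm),
          List.getD_eq_getElem _ 0 hm]
        simp [hmr, Ne.symm hkm, List.getElem_set_ne hkm]

theorem res_step (P : List Int) (i : Nat) (h1 : 1 ≤ i) (h2 : i < P.length) :
    ((activeL P i).filter (fun k => decide (gP P i < gP P k))).foldl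
      (fun r k => r.set k ((i : Int) - (k : Int))) (resOf P i) = resOf P (i + 1) := by
  apply List.ext_getElem
  · rw [foldl_set_length, resOf_length, resOf_length]
  · intro m hma hmb
    have hm : m < P.length := by simpa [resOf_length] using hmb
    have hres : m < (resOf P i).length := by simpa [resOf_length] using hm
    rw [← List.getD_eq_getElem _ 0 hma, ← List.getD_eq_getElem _ 0 hmb]
    rw [foldl_set_getD _ _ _ _ hres, resOf_getD P (i + 1) m hm]
    by_cases hmem : m ∈ (activeL P i).filter (fun k => decide (gP P i < gP P k))
    · have hm' := List.mem_filter.mp hmem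
      have ho : openP P m i := ((activeL_mem P i m).mp hm'.1).2
      have hmi : m < i := ((activeL_mem P i m).mp hm'.1).1
      have hd : gP P i < gP P m := by simpa using hm'.2
      have hno : ¬ openP P m (i + 1) := by
        rw [openP_succ P m i hmi]; intro hc; omega
      rw [if_pos hmem, if_pos ⟨by omega, hno⟩, ddP_first P m i h2 hmi ho hd]
    · rw [if_neg hmem, resOf_getD P i m hm]
      by_cases hmi : m < i
      · by_cases ho : openP P m i
        · have hle : gP P m ≤ gP P i := by
            by_contra hc
            exact hmem (List.mem_filter.mpr ⟨(activeL_mem P i m).mpr ⟨hmi, ho⟩, by simp; omega⟩)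
          have hop : openP P m (i + 1) := (openP_succ P m i hmi).mpr ⟨ho, hle⟩
          rw [if_neg (fun hc => hc.2 ho), if_neg (fun hc => hc.2 hop)]
        · have hno : ¬ openP P m (i + 1) := fun hc => ho ((openP_succ P m i hmi).mp hc).1
          rw [if_pos ⟨hmi, ho⟩, if_pos ⟨by omega, hno⟩]
      · by_cases hmi1 : m < i + 1
        · have hmei : m = i := by omega
          subst hmei
          have hop : openP P m (m + 1) := by intro j hj hmj; omega
          rw [if_neg (fun hc => hmi hc.1), if_neg (fun hc => hc.2 hop)]
        · rw [if_neg (fun hc => hmi hc.1), if_neg (fun hc => hmi1 hc.1)]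

-- ---- the main loop invariant ----

theorem main_inv (P : List Int) :
    ∀ fuel i, 1 ≤ i → i ≤ P.length → P.length - i = fuel →
    (mainA P P.length i (stackOf P i) (resOf P i)).2 = resOf P P.length := by
  intro fuel
  induction fuel with
  | zero =>
    intro i h1 h2 hf
    have : i = P.length := by omega
    subst this
    rw [mainA, dif_neg (by omega)]
  | succ fuel ih =>
    intro i h1 h2 hf
    have hi : i < P.length := by omega
    rw [mainA, dif_pos hi]
    have hg : P.getD i 0 = gP P i := rfl
    have hpop := popA_spec P (gP P i) i (activeL P i) (resOf P i) (activeL_pairwise P i)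
    have hstep := res_step P i h1 hi
    have hstack : (gP P i, i) ::
        ((activeL P i).filter (fun k => !decide (gP P i < gP P k))).map
          (fun k => (gP P k, k)) = stackOf P (i + 1) := by
      rw [stackOf, activeL_succ P i, List.map_cons]
    simp only [hg, stackOf, hpop, hstep, hstack]
    exact ih (i + 1) (by omega) (by omega) (by omega)

-- ---- the fixup loop ----

theorem fixA_length (n : Nat) : ∀ fuel i res, n - 1 - i = fuel →
    (fixA n i res).length = res.length := by
  intro fuel
  induction fuel with
  | zero =>
    intro i res hf
    rw [fixA, dif_neg (by omega)]
  | succ fuel ih =>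
    intro i res hf
    by_cases h : i < n - 1
    · have hih := ih (i + 1)
        (if res.getD i 0 == 0 then res.set i ((n : Int) - (i : Int) - 1) else res) (by omega)
      rw [fixA, dif_pos h, hih]
      split <;> simp
    · rw [fixA, dif_neg h]

theorem fixA_getD (n : Nat) : ∀ fuel i res, n - 1 - i = fuel → res.length = n →
    ∀ m, m < n →
    (fixA n i res).getD m 0 =
      if i ≤ m ∧ m < n - 1 ∧ res.getD m 0 = 0 then (n : Int) - m - 1 else res.getD m 0 := by
  intro fuel
  induction fuel with
  | zero =>
    intro i res hf hlen m hm
    rw [fixA, dif_neg (by omega)]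
    have : ¬ (i ≤ m ∧ m < n - 1 ∧ res.getD m 0 = 0) := by
      rintro ⟨a, b, _⟩; omega
    rw [if_neg this]
  | succ fuel ih =>
    intro i res hf hlen m hm
    have h : i < n - 1 := by omega
    rw [fixA, dif_pos h]
    set res' := if res.getD i 0 == 0 then res.set i ((n : Int) - (i : Int) - 1) else res with hres'
    have hlen' : res'.length = n := by rw [hres']; split <;> simp [hlen]
    rw [ih (i + 1) res' (by omega) hlen' m hm]
    have hget : res'.getD m 0 =
        if m = i ∧ res.getD i 0 = 0 then (n : Int) - i - 1 else res.getD m 0 := by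
      rw [hres']
      by_cases hz : res.getD i 0 = 0
      · rw [if_pos (by simpa using hz)]
        by_cases hmi : m = i
        · subst hmi
          rw [List.getD_eq_getElem _ 0 (by simp [hlen]; omega), if_pos ⟨rfl, hz⟩]
          simp [hlen]
        · rw [if_neg (fun hc => hmi hc.1),
            List.getD_eq_getElem _ 0 (by simp [hlen]; omega),
            List.getD_eq_getElem _ 0 (by omega)]
          rw [List.getElem_set_ne (fun hc => hmi hc.symm)]
      · rw [if_neg (by simpa using hz), if_neg (fun hc => hz hc.2)]
    by_cases hmi : m = i
    · subst hmi
      by_cases hz : res.getD m 0 = 0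
      · have h1 : res'.getD m 0 = (n : Int) - m - 1 := by rw [hget, if_pos ⟨rfl, hz⟩]
        rw [h1]
        have hA : ¬ (m + 1 ≤ m ∧ m < n - 1 ∧ (n : Int) - m - 1 = 0) := by
          rintro ⟨a, _, _⟩; omega
        rw [if_neg hA, if_pos ⟨le_refl m, h, hz⟩]
      · have h1 : res'.getD m 0 = res.getD m 0 := by rw [hget, if_neg (fun hc => hz hc.2)]
        rw [h1]
        have hA : ¬ (m + 1 ≤ m ∧ m < n - 1 ∧ res.getD m 0 = 0) := by rintro ⟨a, _, _⟩; omega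
        have hB : ¬ (m ≤ m ∧ m < n - 1 ∧ res.getD m 0 = 0) := by rintro ⟨_, _, c⟩; exact hz c
        rw [if_neg hA, if_neg hB]
    · have h1 : res'.getD m 0 = res.getD m 0 := by rw [hget, if_neg (fun hc => hmi hc.1)]
      rw [h1]
      by_cases hc : i + 1 ≤ m ∧ m < n - 1 ∧ res.getD m 0 = 0
      · rw [if_pos hc, if_pos ⟨by omega, hc.2.1, hc.2.2⟩]
      · have hB : ¬ (i ≤ m ∧ m < n - 1 ∧ res.getD m 0 = 0) := by
          rintro ⟨a, b, c⟩; exact hc ⟨by omega, b, c⟩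
        rw [if_neg hc, if_neg hB]

theorem fix_final (P : List Int) :
    fixA P.length 0 (resOf P P.length) = (List.range P.length).map (fun k => ddP P k) := by
  apply List.ext_getElem
  · rw [fixA_length P.length _ 0 _ rfl, resOf_length]; simp
  · intro m hma hmb
    have hm : m < P.length := by simpa using hmb
    rw [← List.getD_eq_getElem _ 0 hma, ← List.getD_eq_getElem _ 0 hmb]
    rw [fixA_getD P.length _ 0 _ rfl (resOf_length P P.length) m hm]
    have hrm := resOf_getD P P.length m hm
    have hdd : (List.map (fun k => ddP P k) (List.range P.length)).getD m 0 = ddP P m := by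
      rw [List.getD_eq_getElem _ 0 (by simpa using hm)]; simp
    rw [hdd]
    by_cases ho : openP P m P.length
    · have hz : (resOf P P.length).getD m 0 = 0 := by rw [hrm, if_neg (fun hc => hc.2 ho)]
      by_cases hlast : m < P.length - 1
      · rw [if_pos ⟨by omega, hlast, hz⟩, ddP_none P m hm ho]
      · rw [if_neg (by rintro ⟨_, b, _⟩; omega), hz, ddP_none P m hm ho]
        omega
    · have hdrop : ddP P m ≠ 0 := by
        have hne : P.drop (m + 1) ≠ [] := by
          intro hc
          have hle : P.length ≤ m + 1 := List.drop_eq_nil_iff.mp hc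
          exact ho (fun j hj hmj => absurd hj (by omega))
        have := countB_pos (gP P m) (P.drop (m + 1)) hne
        unfold ddP; omega
      have hv : (resOf P P.length).getD m 0 = ddP P m := by rw [hrm, if_pos ⟨hm, ho⟩]
      rw [if_neg (by rintro ⟨_, _, c⟩; rw [hv] at c; exact hdrop c), hv]

-- ---- initial state ----

theorem stackOf_one (p0 : Int) (rest : List Int) :
    stackOf (p0 :: rest) 1 = [(p0, 0)] := by
  have h3 : List.filter (fun k => decide (openP (p0 :: rest) k 1)) [0] = [0] := by
    rw [List.filter_cons]; simp
  simp [stackOf, activeL, List.range_succ, h3, gP]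

theorem resOf_one (P : List Int) : resOf P 1 = List.replicate P.length 0 := by
  unfold resOf
  rw [List.eq_replicate_iff]
  refine ⟨by simp, ?_⟩
  intro b hb
  rw [List.mem_map] at hb
  rcases hb with ⟨k, _, hk⟩
  by_cases h : k < 1 ∧ ¬ openP P k 1
  · exfalso
    have : openP P k 1 := by intro j hj hkj; omega
    exact h.2 this
  · rw [if_neg h] at hk; omega

-- ===== VERDICT (by name: the statement is the Claim_ definition above) =====
theorem solution_spec : Claim_equal_solution := by
  intro P _ hne
  unfold Spec_solution
  rw [solution_alt_eq]
  match P, hne with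
  | p0 :: rest, _ =>
    show fixA _ _ (mainA _ _ 1 [(p0, 0)] (List.replicate _ 0)).2 = _
    rw [← stackOf_one p0 rest, ← resOf_one (p0 :: rest)]
    rw [main_inv (p0 :: rest) ((p0 :: rest).length - 1) 1 (by simp) (by simp) rfl]
    exact fix_final (p0 :: rest)
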